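-- pv_equiv track=rewrite | github.com/maglass/collection-generator | step201_extract_tokens_from_desc.py | _grouping_corpus
-- ===== SOURCE A (Python) =====
-- def _grouping_corpus(data, field, value):
--     corpus_group = dict()
--     text_group = dict()
--     for dd in data:
--         key = dd[field]
--         li = corpus_group.get(key, list())
--         li.append(dd)
--         corpus_group[key] = li
--
--         li = text_group.get(key, list())
--         li.append(dd[value])
--         text_group[key] = li
--
--     return corpus_group, text_group
-- ===== SOURCE B (Python) =====
-- def _grouping_corpus(data, field, value):
--     # distinct keys in order of first occurrence
--     keys = []
--     for dd in data:
--         k = dd[field]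
--         if k not in keys:
--             keys.append(k)
--     # for each key, rescan the data collecting its records / its values
--     corpus_group = {k: [dd for dd in data if dd[field] == k] for k in keys}
--     text_group = {k: [dd[value] for dd in data if dd[field] == k] for k in keys}
--     return corpus_group, text_group
-- ===== Notes on version B (the rewrite author's own statement) =====
-- stated objective: alternative
-- what changed: B never accumulates into dicts during the pass over data: it first collects the distinct field keys in first-occurrence order, then for each key re-scans data with a filter to build that key's record list and value list, replacing A's single-pass dict accumulation by nested key/filter scans.
import Mathlib
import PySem

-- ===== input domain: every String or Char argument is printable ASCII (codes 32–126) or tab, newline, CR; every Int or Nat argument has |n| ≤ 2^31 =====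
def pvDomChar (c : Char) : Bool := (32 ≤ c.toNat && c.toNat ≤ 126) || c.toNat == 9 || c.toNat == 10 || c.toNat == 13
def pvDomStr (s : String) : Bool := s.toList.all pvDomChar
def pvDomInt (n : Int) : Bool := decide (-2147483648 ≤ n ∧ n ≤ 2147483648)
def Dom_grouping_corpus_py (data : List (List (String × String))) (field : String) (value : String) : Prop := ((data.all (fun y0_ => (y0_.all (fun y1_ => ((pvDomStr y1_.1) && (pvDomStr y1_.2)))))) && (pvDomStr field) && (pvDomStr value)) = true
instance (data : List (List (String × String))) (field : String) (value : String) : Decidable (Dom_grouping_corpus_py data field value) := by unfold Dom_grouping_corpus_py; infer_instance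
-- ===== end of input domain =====

-- B replaces A's single-pass dict accumulation by a distinct-keys pass followed by
-- one filtering re-scan of the data per key (objective: alternative algorithm, not faster).

-- dd[k] on a record (a Python dict, here an association list): first match;
-- the KeyError case (no match) is excluded by Pre_, the .getD "" default is never reached inside Pre_.
def recGet (dd : List (String × String)) (k : String) : String :=
  ((dd.find? (fun p => p.1 == k)).map Prod.snd).getD ""

-- ===== PORT A =====
def grouping_corpus_py (data : List (List (String × String))) (field : String) (value : String) : (List (String × List (List (String × String)))) × (List (String × List String)) :=
  let st := data.foldl
    (fun (st : PySem.Dict String (List (List (String × String))) × PySem.Dict String (List String)) dd =>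
      let key := recGet dd field
      let li := st.1.getD key []
      let cg := st.1.insert key (li ++ [dd])
      let li2 := st.2.getD key []
      let tg := st.2.insert key (li2 ++ [recGet dd value])
      (cg, tg))
    (PySem.Dict.empty, PySem.Dict.empty)
  (st.1.items, st.2.items)

-- ===== PORT B =====
def grouping_corpus_py_alt (data : List (List (String × String))) (field : String) (value : String) : (List (String × List (List (String × String)))) × (List (String × List String)) :=
  -- distinct keys in order of first occurrence ('if k not in keys: keys.append(k)' = Set.add)
  let keys := data.foldl (fun ks dd => PySem.Set.add ks (recGet dd field)) PySem.Set.empty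
  -- per-key filtering re-scans of data
  let corpus := keys.map (fun k => (k, data.filter (fun dd => recGet dd field == k)))
  let text := keys.map (fun k => (k, (data.filter (fun dd => recGet dd field == k)).map (fun dd => recGet dd value)))
  (corpus, text)

-- ===== PRECONDITION & SPEC =====
-- Pre_: every record contains both the field key and the value key; on any other input A raises KeyError.
def Pre_grouping_corpus_py (data : List (List (String × String))) (field : String) (value : String) : Prop :=
  data.all (fun dd => dd.any (fun p => p.1 == field) && dd.any (fun p => p.1 == value)) = true
instance (data : List (List (String × String))) (field : String) (value : String) : Decidable (Pre_grouping_corpus_py data field value) := by unfold Pre_grouping_corpus_py; infer_instance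

def pvWitness_grouping_corpus_py : (List (List (String × String))) × String × String :=
  ([[("k", "a"), ("v", "x")], [("k", "b"), ("v", "y")], [("k", "a"), ("v", "z")]], "k", "v")

def Spec_grouping_corpus_py (data : List (List (String × String))) (field : String) (value : String) (out : (List (String × List (List (String × String)))) × (List (String × List String))) : Prop := out = grouping_corpus_py_alt data field value
instance (data : List (List (String × String))) (field : String) (value : String) (out : (List (String × List (List (String × String)))) × (List (String × List String))) : Decidable (Spec_grouping_corpus_py data field value out) := by unfold Spec_grouping_corpus_py; infer_instance

-- ===== CLAIM (what is proved, stated in full; the proofs are below) =====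
def Claim_equal_grouping_corpus_py : Prop := ∀ (data : List (List (String × String))) (field : String) (value : String), Dom_grouping_corpus_py data field value → Pre_grouping_corpus_py data field value → Spec_grouping_corpus_py data field value (grouping_corpus_py data field value)

-- ===== LEMMAS AND PROOFS =====

-- A's interleaved fold is the pair of two independent grouping folds
theorem pair_fold (field value : String) (data : List (List (String × String)))
    (c : PySem.Dict String (List (List (String × String)))) (t : PySem.Dict String (List String)) :
    data.foldl
      (fun (st : PySem.Dict String (List (List (String × String))) × PySem.Dict String (List String)) dd =>
        let key := recGet dd field
        let li := st.1.getD key []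
        let cg := st.1.insert key (li ++ [dd])
        let li2 := st.2.getD key []
        let tg := st.2.insert key (li2 ++ [recGet dd value])
        (cg, tg))
      (c, t)
    = (data.foldl (fun d dd => d.modify (recGet dd field) [] (· ++ [dd])) c,
       data.foldl (fun d dd => d.modify (recGet dd field) [] (· ++ [recGet dd value])) t) := by
  induction data generalizing c t with
  | nil => rfl
  | cons dd rest ih => exact ih _ _

-- characterisation of one grouping fold: items = distinct keys, each with its filtered, mapped records
theorem grouping_fold_items {ν : Type} (key : List (String × String) → String)
    (g : List (String × String) → ν) (data : List (List (String × String))) :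
    (data.foldl (fun (d : PySem.Dict String (List ν)) dd => d.modify (key dd) [] (· ++ [g dd])) PySem.Dict.empty).items
    = (data.foldl (fun ks dd => PySem.Set.add ks (key dd)) PySem.Set.empty).map
        (fun k => (k, ((data.filter (fun dd => key dd == k)).map g))) := by
  -- rewrite the fold over records as a fold over (key, value) pairs
  have hmap : ∀ (d : PySem.Dict String (List ν)),
      data.foldl (fun d dd => d.modify (key dd) [] (· ++ [g dd])) d
      = (data.map (fun dd => (key dd, g dd))).foldl (fun d p => d.modify p.1 [] (· ++ [p.2])) d := by
    intro d; rw [List.foldl_map]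
  set F := data.foldl (fun (d : PySem.Dict String (List ν)) dd => d.modify (key dd) [] (· ++ [g dd])) PySem.Dict.empty with hF
  have hnodup : F.keys.Nodup := by
    rw [hF]
    exact PySem.Dict.nodup_keys_foldl_modify_key data key [] (fun d dd l => l ++ [g dd]) _ PySem.Dict.nodup_keys_empty
  have hkeys : F.keys = data.foldl (fun ks dd => PySem.Set.add ks (key dd)) PySem.Set.empty := by
    rw [hF, PySem.Dict.keys_foldl_modify_key]
    show PySem.Set.update PySem.Dict.empty.keys (data.map key) = _
    rw [PySem.Set.update, List.foldl_map]
    rfl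
  have hget : ∀ k, F.getD k [] = (data.filter (fun dd => key dd == k)).map g := by
    intro k
    rw [hF, hmap, PySem.Dict.getD_foldl_modify_append]
    rw [PySem.Dict.getD_empty, List.nil_append, List.filter_map, List.map_map]
    rfl
  rw [PySem.Dict.items_eq_map_keys F hnodup [], hkeys]
  apply List.map_congr_left
  intro k _
  rw [hget]

-- ===== VERDICT (by name: the statement is the Claim_ definition above) =====
theorem grouping_corpus_py_spec : Claim_equal_grouping_corpus_py := by
  intro data field value _ _
  show grouping_corpus_py data field value = grouping_corpus_py_alt data field value
  unfold grouping_corpus_py grouping_corpus_py_alt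
  rw [pair_fold]
  show ((data.foldl (fun d dd => d.modify (recGet dd field) [] (· ++ [dd])) PySem.Dict.empty).items,
        (data.foldl (fun d dd => d.modify (recGet dd field) [] (· ++ [recGet dd value])) PySem.Dict.empty).items)
      = ((data.foldl (fun ks dd => PySem.Set.add ks (recGet dd field)) PySem.Set.empty).map
           (fun k => (k, data.filter (fun dd => recGet dd field == k))),
         (data.foldl (fun ks dd => PySem.Set.add ks (recGet dd field)) PySem.Set.empty).map
           (fun k => (k, (data.filter (fun dd => recGet dd field == k)).map (fun dd => recGet dd value))))
  rw [grouping_fold_items (fun dd => recGet dd field) (fun dd => dd) data,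
      grouping_fold_items (fun dd => recGet dd field) (fun dd => recGet dd value) data]
  simp
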